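-- pv_equiv track=rewrite | github.com/andychisholm/nel | nel/model/prepare/wikidata.py | iter_leaves
-- ===== SOURCE A (Python) =====
-- def iter_leaves(graph, root, excluded = None):
--     # tracks visited nodes; excludes nodes from traversal if pre-populated
--     excluded = set() if excluded == None else excluded
--     pending = list(graph[root])
--     excluded = excluded.union(pending)
--
--     # not quite as pretty, but faster than the recursive version
--     while pending:
--         node = pending.pop()
--         excluded.add(node)
--
--         children = graph.get(node, None)
--         if children:
--             pending += [n for n in children if n not in excluded]
--         else:
--             yield node
-- ===== SOURCE B (Python) =====
-- def iter_leaves(graph, root, excluded=None):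
--     # recursive traversal; excludes nodes from traversal if pre-populated
--     excluded = set() if excluded is None else excluded
--     top = list(graph[root])
--     excluded = excluded.union(top)
--
--     def visit(node):
--         excluded.add(node)
--         children = graph.get(node)
--         if children:
--             batch = [n for n in children if n not in excluded]
--             for n in reversed(batch):
--                 yield from visit(n)
--         else:
--             yield node
--
--     for n in reversed(top):
--         yield from visit(n)
-- ===== Notes on version B (the rewrite author's own statement) =====
-- stated objective: alternative
-- what changed: Replaces the explicit pending-stack while-loop with a recursive inner generator visit() that marks the node, snapshots the filtered child batch and recurses over it in reverse, driven over the reversed root children.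
import Mathlib
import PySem

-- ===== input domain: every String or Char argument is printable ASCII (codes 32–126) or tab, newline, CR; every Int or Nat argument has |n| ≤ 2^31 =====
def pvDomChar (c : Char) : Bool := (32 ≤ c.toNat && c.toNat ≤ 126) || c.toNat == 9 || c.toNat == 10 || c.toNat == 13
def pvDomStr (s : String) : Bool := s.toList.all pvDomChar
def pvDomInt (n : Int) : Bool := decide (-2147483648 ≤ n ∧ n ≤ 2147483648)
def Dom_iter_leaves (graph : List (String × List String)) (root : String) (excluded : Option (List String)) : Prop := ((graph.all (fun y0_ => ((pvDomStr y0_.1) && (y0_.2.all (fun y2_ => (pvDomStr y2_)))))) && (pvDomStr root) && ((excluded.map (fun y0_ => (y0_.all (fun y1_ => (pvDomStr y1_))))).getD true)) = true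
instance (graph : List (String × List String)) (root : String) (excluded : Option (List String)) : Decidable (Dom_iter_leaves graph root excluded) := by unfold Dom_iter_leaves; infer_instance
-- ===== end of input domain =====

-- B replaces A's explicit pending-stack loop by a recursive generator over reversed child batches; equal return value (A mutates no caller-visible state: union copies the set).


-- first-match lookup of a Python dict passed as an association list (graph[k] / graph.get(k))
def pvLookup (g : List (String × List String)) (k : String) : Option (List String) :=
  (g.find? (fun p => p.1 == k)).map (·.2)

-- fuel bound for the traversal (totality guard only; one unit per pop/visit; the run makes at most |graph[root]| + Σ|children| iterations)
def pvFuel (g : List (String × List String)) (top : List String) : Nat :=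
  top.length + (g.map (fun p => p.2.length)).sum + 1

-- ===== PORT A =====
-- while pending: node = pending.pop(); excluded.add(node); children = graph.get(node); push filtered children or yield
def loopA (g : List (String × List String)) : Nat → List String → PySem.Set String → List String → List String
  | 0, _, _, acc => acc
  | f+1, pending, s, acc =>
    match pending.getLast? with
    | none => acc
    | some node =>
      let rest := pending.dropLast
      let s' := PySem.Set.add s node
      match pvLookup g node with
      | some cs =>
        if cs.isEmpty then loopA g f rest s' (acc ++ [node])
        else loopA g f (rest ++ cs.filter (fun n => !(PySem.Set.contains s' n))) s' acc
      | none => loopA g f rest s' (acc ++ [node])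

def iter_leaves (graph : List (String × List String)) (root : String) (excluded : Option (List String)) : List String :=
  let excl0 : PySem.Set String := match excluded with
    | none => PySem.Set.empty
    | some l => PySem.Set.ofList l
  match pvLookup graph root with
  | none => []   -- Python raises KeyError here; excluded by Pre_iter_leaves
  | some top =>
    let s := PySem.Set.union excl0 top
    loopA graph (pvFuel graph top) top s []

-- ===== PORT B =====
-- def visit(node): excluded.add(node); children = graph.get(node); if children: recurse over reversed filtered batch else yield node
-- fuel is threaded (one unit per visit call); 'min' only makes the decrease syntactic — the returned fuel is always ≤ the input fuel (visitB_fuel_le below)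
mutual
def visitB (g : List (String × List String)) : Nat → String → PySem.Set String → (List String × PySem.Set String × Nat)
  | 0, _, s => ([], s, 0)
  | f+1, node, s =>
    let s' := PySem.Set.add s node
    match pvLookup g node with
    | some cs =>
      if cs.isEmpty then ([node], s', f)
      else
        let batch := cs.filter (fun n => !(PySem.Set.contains s' n))
        visitListB g f batch.reverse s'
    | none => ([node], s', f)
  termination_by f _ _ => ((f : Nat), 0)
  decreasing_by simp_wf; exact Prod.Lex.left _ _ (Nat.lt_succ_self _)

-- the 'for n in reversed(batch): yield from visit(n)' loop, threading (yields, excluded)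
def visitListB (g : List (String × List String)) : Nat → List String → PySem.Set String → (List String × PySem.Set String × Nat)
  | f, [], s => ([], s, f)
  | f, n :: ns, s =>
    let r1 := visitB g f n s
    let r2 := visitListB g (min r1.2.2 f) ns r1.2.1
    (r1.1 ++ r2.1, r2.2)
  termination_by f ns _ => ((f : Nat), ns.length + 1)
  decreasing_by
  · simp_wf
    exact Prod.Lex.right _ (Nat.zero_lt_succ _)
  · simp_wf
    refine (Nat.lt_or_eq_of_le (Nat.min_le_right _ _)).elim (fun h => Prod.Lex.left _ _ h) (fun h => ?_)
    rw [h]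
    exact Prod.Lex.right _ (Nat.lt_succ_self _)
end

def iter_leaves_alt (graph : List (String × List String)) (root : String) (excluded : Option (List String)) : List String :=
  let excl0 : PySem.Set String := match excluded with
    | none => PySem.Set.empty
    | some l => PySem.Set.ofList l
  match pvLookup graph root with
  | none => []   -- Python raises KeyError here; excluded by Pre_iter_leaves
  | some top =>
    let s := PySem.Set.union excl0 top
    (visitListB graph (pvFuel graph top) top.reverse s).1

-- ===== PRECONDITION & SPEC =====
-- Pre_ excludes only the inputs where Python A raises KeyError: root not a key of graph
def Pre_iter_leaves (graph : List (String × List String)) (root : String) (excluded : Option (List String)) : Prop :=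
  (pvLookup graph root).isSome = true
instance (graph : List (String × List String)) (root : String) (excluded : Option (List String)) : Decidable (Pre_iter_leaves graph root excluded) := by unfold Pre_iter_leaves; infer_instance

def pvWitness_iter_leaves : (List (String × List String)) × String × Option (List String) :=
  ([("r", ["a", "b"]), ("a", ["b"])], "r", none)

def Spec_iter_leaves (graph : List (String × List String)) (root : String) (excluded : Option (List String)) (out : List String) : Prop := out = iter_leaves_alt graph root excluded
instance (graph : List (String × List String)) (root : String) (excluded : Option (List String)) (out : List String) : Decidable (Spec_iter_leaves graph root excluded out) := by unfold Spec_iter_leaves; infer_instance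

-- ===== CLAIM (what is proved, stated in full; the proofs are below) =====
def Claim_equal_iter_leaves : Prop := ∀ (graph : List (String × List String)) (root : String) (excluded : Option (List String)), Dom_iter_leaves graph root excluded → Pre_iter_leaves graph root excluded → Spec_iter_leaves graph root excluded (iter_leaves graph root excluded)

-- ===== LEMMAS AND PROOFS =====

-- returned fuel never exceeds the input fuel (so the 'min' in visitListB is the identity)
theorem fuel_le_all (g : List (String × List String)) (f : Nat) :
    (∀ n s, (visitB g f n s).2.2 ≤ f) ∧ (∀ ns s, (visitListB g f ns s).2.2 ≤ f) := by
  induction f using Nat.strong_induction_on with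
  | _ f IH =>
    have hv : ∀ n s, (visitB g f n s).2.2 ≤ f := by
      intro n s
      match f with
      | 0 => simp [visitB]
      | k+1 =>
        have hl : ∀ ns s, (visitListB g k ns s).2.2 ≤ k := (IH k (by omega)).2
        unfold visitB
        cases h : pvLookup g n with
        | none => simp
        | some cs =>
          by_cases hcs : cs.isEmpty
          · simp [hcs]
          · simp only [hcs, if_false]
            exact le_trans (hl _ _) (by omega)
    have hl : ∀ ns, ∀ f' ≤ f, ∀ s, (visitListB g f' ns s).2.2 ≤ f' := by
      intro ns
      induction ns with
      | nil => intro f' _ s; simp [visitListB]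
      | cons n ns ihn =>
        intro f' hf' s
        unfold visitListB
        exact le_trans (ihn _ (le_trans (min_le_right _ _) hf') _) (min_le_right _ _)
    exact ⟨hv, fun ns s => hl ns f le_rfl s⟩

theorem visitB_fuel_le (g : List (String × List String)) (f : Nat) (n : String) (s : PySem.Set String) :
    (visitB g f n s).2.2 ≤ f := (fuel_le_all g f).1 n s

-- the cons equation of visitListB with the 'min' simplified away
theorem visitListB_cons (g : List (String × List String)) (f : Nat) (n : String) (ns : List String) (s : PySem.Set String) :
    visitListB g f (n :: ns) s =
      ((visitB g f n s).1 ++ (visitListB g (visitB g f n s).2.2 ns (visitB g f n s).2.1).1,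
       (visitListB g (visitB g f n s).2.2 ns (visitB g f n s).2.1).2) := by
  conv_lhs => unfold visitListB
  simp [Nat.min_eq_left (visitB_fuel_le g f n s)]

theorem visitListB_zero (g : List (String × List String)) (ns : List String) (s : PySem.Set String) :
    visitListB g 0 ns s = ([], s, 0) := by
  induction ns with
  | nil => simp [visitListB]
  | cons n ns ih =>
    rw [visitListB_cons]
    simp [visitB, ih]

theorem visitListB_append (g : List (String × List String)) (xs ys : List String) :
    ∀ (f : Nat) (s : PySem.Set String),
    visitListB g f (xs ++ ys) s =
      ((visitListB g f xs s).1 ++ (visitListB g (visitListB g f xs s).2.2 ys (visitListB g f xs s).2.1).1,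
       (visitListB g (visitListB g f xs s).2.2 ys (visitListB g f xs s).2.1).2) := by
  induction xs with
  | nil => intro f s; simp [visitListB]
  | cons x xs ih =>
    intro f s
    rw [List.cons_append, visitListB_cons, visitListB_cons, ih]
    simp [List.append_assoc]

-- main simulation: A's stack loop = B's threaded recursion over the reversed stack, for EVERY fuel value
theorem loopA_eq_visitListB (g : List (String × List String)) :
    ∀ (f : Nat) (pending : List String) (s : PySem.Set String) (acc : List String),
    loopA g f pending s acc = acc ++ (visitListB g f pending.reverse s).1 := by
  intro f
  induction f with
  | zero => intro pending s acc; simp [loopA, visitListB_zero]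
  | succ f ih =>
    intro pending s acc
    cases hp : pending.getLast? with
    | none =>
      have : pending = [] := List.getLast?_eq_none_iff.mp hp
      subst this
      simp [loopA, visitListB]
    | some node =>
      have hdec : pending.dropLast ++ [node] = pending := by
        have := List.getLast?_eq_some_iff.mp hp
        obtain ⟨l, hl⟩ := this
        simp [hl]
      have hrev : pending.reverse = node :: pending.dropLast.reverse := by
        rw [← hdec]; simp
      rw [hrev, visitListB_cons]
      show (match pending.getLast? with
        | none => acc
        | some node =>
          let rest := pending.dropLast
          let s' := PySem.Set.add s node
          match pvLookup g node with
          | some cs =>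
            if cs.isEmpty then loopA g f rest s' (acc ++ [node])
            else loopA g f (rest ++ cs.filter (fun n => !(PySem.Set.contains s' n))) s' acc
          | none => loopA g f rest s' (acc ++ [node])) = _
      rw [hp]
      simp only
      cases hg : pvLookup g node with
      | none =>
        simp only [visitB, hg, ih]
        simp
      | some cs =>
        by_cases hcs : cs.isEmpty
        · simp only [visitB, hg, hcs, if_true, ih]
          simp
        · simp only [visitB, hg, hcs, if_false, ih]
          rw [List.reverse_append, visitListB_append]
          simp [List.append_assoc]

-- ===== VERDICT (by name: the statement is the Claim_ definition above) =====
theorem iter_leaves_spec : Claim_equal_iter_leaves := by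
  intro graph root excluded _ _
  unfold Spec_iter_leaves iter_leaves iter_leaves_alt
  cases h : pvLookup graph root with
  | none => rfl
  | some top =>
    simp only
    rw [loopA_eq_visitListB]
    simp
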